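-- pv_equiv track=rewrite | github.com/koragendum/Conlog | conlog/frontends.py | scan_junctions
-- ===== SOURCE A (Python) =====
-- def scan_junctions(grid, cells, init_junction_num):
--     """
--     Modifies cells, return (next junction number, dict of junctions).
--     """
--     width  = len(grid[0])
--     height = len(grid)
--     junction_num = init_junction_num
--     junctions = dict()
--     for row in range(height):
--         for column in range(width):
--             if grid[row][column] == ' ' or cells[row][column] is not None:
--                 continue
--             flux = 0
--             for dr in (-1, +1):
--                 adj = row + dr
--                 if height > adj >= 0:
--                     grid_val = grid[adj][column]
--                     cell_val = cells[adj][column]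
--                     if grid_val != ' ' and (cell_val is None or cell_val >= init_junction_num):
--                         flux += 1
--             for dc in (-1, +1):
--                 adj = column + dc
--                 if width > adj >= 0:
--                     grid_val = grid[row][adj]
--                     cell_val = cells[row][adj]
--                     if grid_val != ' ' and (cell_val is None or cell_val >= init_junction_num):
--                         flux += 1
--             if flux >= 3:
--                 cells[row][column] = junction_num
--                 junctions[junction_num] = (row, column)
--                 junction_num += 1
--
--     return (junction_num, junctions)
-- ===== SOURCE B (Python) =====
-- def scan_junctions(grid, cells, init_junction_num):
--     """
--     Modifies cells, return (next junction number, dict of junctions).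
--     Re-implementation by scatter instead of gather: pass 1 lets every active
--     cell distribute +1 into a counter at each of its four neighbor coordinates
--     (instead of each candidate probing its neighbors); pass 2 walks the grid in
--     row-major order and turns every unmarked non-space cell whose scattered
--     count reaches 3 into a junction.  Correct because marking a cell never
--     changes its "active" status (None and values >= init are both active), so
--     the counts computed from the original cells equal A's interleaved probes.
--     """
--     width = len(grid[0])
--     height = len(grid)
--     flux = {}
--     for r in range(height):
--         for c in range(width):
--             if grid[r][c] != ' ':
--                 v = cells[r][c]
--                 if v is None or v >= init_junction_num:
--                     for n in ((r - 1, c), (r + 1, c), (r, c - 1), (r, c + 1)):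
--                         flux[n] = flux.get(n, 0) + 1
--     junction_num = init_junction_num
--     junctions = {}
--     for r in range(height):
--         for c in range(width):
--             if grid[r][c] != ' ' and cells[r][c] is None and flux.get((r, c), 0) >= 3:
--                 cells[r][c] = junction_num
--                 junctions[junction_num] = (r, c)
--                 junction_num += 1
--     return (junction_num, junctions)
-- ===== Notes on version B (the rewrite author's own statement) =====
-- stated objective: alternative
-- what changed: B inverts the data flow from gather to scatter: instead of each candidate cell probing its four neighbors while the array mutates, a first pass has every active cell distribute +1 into a coordinate-keyed counter at each of its four neighbors, and a second pass numbers the unmarked non-space cells whose scattered count reaches 3; correct because marking never changes a cell's active status.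
-- outside the precondition, e.g. on scan_junctions([[' ']], [], 0): A returns (0, {}), B returns (0, {})
import Mathlib
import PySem

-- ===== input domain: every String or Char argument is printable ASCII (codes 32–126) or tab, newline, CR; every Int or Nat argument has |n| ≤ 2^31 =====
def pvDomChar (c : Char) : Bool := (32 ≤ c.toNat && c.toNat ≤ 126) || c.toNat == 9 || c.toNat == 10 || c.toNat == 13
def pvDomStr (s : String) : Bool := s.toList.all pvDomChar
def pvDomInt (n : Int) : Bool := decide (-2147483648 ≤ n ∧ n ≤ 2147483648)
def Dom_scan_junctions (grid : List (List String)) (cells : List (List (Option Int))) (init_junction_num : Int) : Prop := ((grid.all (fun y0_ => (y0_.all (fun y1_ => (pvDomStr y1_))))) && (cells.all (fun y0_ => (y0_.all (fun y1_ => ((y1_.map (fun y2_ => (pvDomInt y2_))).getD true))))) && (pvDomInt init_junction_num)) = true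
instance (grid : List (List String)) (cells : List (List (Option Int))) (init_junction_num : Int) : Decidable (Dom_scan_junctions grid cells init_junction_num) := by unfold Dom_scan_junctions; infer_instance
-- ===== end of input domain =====

-- B inverts A's gather into a scatter: pass 1 lets every active cell distribute +1 into a
-- coordinate-keyed counter at each of its four neighbors; pass 2 numbers the unmarked non-space
-- cells whose scattered count reaches 3 (objective: alternative, same cost).  Both Pythons mutate
-- `cells` identically; the equivalence proved here is about the RETURN value (the Lean ports
-- return it and leave the argument untouched).

-- shared 2-D read helpers (Python's grid[r][c] / cells[r][c]; total via a default, read only in range under Pre_)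
def pvG (grid : List (List String)) (r c : Int) : String :=
  PySem.List.pyGetD (PySem.List.pyGetD grid r []) c ""

def pvC (cells : List (List (Option Int))) (r c : Int) : Option Int :=
  PySem.List.pyGetD (PySem.List.pyGetD cells r []) c none

-- "grid_val != ' ' and (cell_val is None or cell_val >= init)"
def pvAct (init : Int) (gv : String) (cv : Option Int) : Bool :=
  !(gv == " ") && (match cv with | none => true | some v => decide (init ≤ v))

-- cells[r][c] = v
def pvSet2 (cs : List (List (Option Int))) (r c : Int) (v : Option Int) :
    List (List (Option Int)) :=
  PySem.List.pySetD cs r (PySem.List.pySetD (PySem.List.pyGetD cs r []) c v)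

-- ===== PORT A =====
-- the body of A's double loop, acting on the state (cells, junction_num, junctions)
def pvStepA (grid : List (List String)) (init h w : Int)
    (st : List (List (Option Int)) × Int × PySem.Dict Int (Int × Int)) (r c : Int) :
    List (List (Option Int)) × Int × PySem.Dict Int (Int × Int) :=
  if pvG grid r c == " " || (pvC st.1 r c).isSome then st
  else
    let flux : Int := [(-1 : Int), 1].foldl (fun f dr =>
      let adj := r + dr
      if adj < h ∧ 0 ≤ adj then
        if pvAct init (pvG grid adj c) (pvC st.1 adj c) then f + 1 else f
      else f) 0
    let flux : Int := [(-1 : Int), 1].foldl (fun f dc =>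
      let adj := c + dc
      if adj < w ∧ 0 ≤ adj then
        if pvAct init (pvG grid r adj) (pvC st.1 r adj) then f + 1 else f
      else f) flux
    if 3 ≤ flux then
      (pvSet2 st.1 r c (some st.2.1), st.2.1 + 1, st.2.2.insert st.2.1 (r, c))
    else st

def scan_junctions (grid : List (List String)) (cells : List (List (Option Int))) (init_junction_num : Int) : Int × (List (Int × Int × Int)) :=
  let width : Int := ((PySem.List.pyGetD grid 0 []).length : Int)
  let height : Int := (grid.length : Int)
  let res := (PySem.List.pyRange 0 height 1).foldl (fun st r =>
      (PySem.List.pyRange 0 width 1).foldl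
        (fun st c => pvStepA grid init_junction_num height width st r c) st)
    (cells, init_junction_num, PySem.Dict.empty)
  (res.2.1, res.2.2.items)

-- ===== PORT B =====
-- the four neighbor coordinates of a cell, in B's scatter order
def pvNbrs (p : Int × Int) : List (Int × Int) :=
  [(p.1 - 1, p.2), (p.1 + 1, p.2), (p.1, p.2 - 1), (p.1, p.2 + 1)]

-- pass-1 body: an active cell scatters +1 into the counter at each of its four neighbors
def pvScatterCell (grid : List (List String)) (cells : List (List (Option Int))) (init : Int)
    (d : PySem.Dict (Int × Int) Int) (r c : Int) : PySem.Dict (Int × Int) Int :=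
  if !(pvG grid r c == " ") then
    let v := pvC cells r c
    if (match v with | none => true | some x => decide (init ≤ x)) then
      (pvNbrs (r, c)).foldl (fun d n => d.insert n (d.getD n 0 + 1)) d
    else d
  else d

-- pass-2 body: mark a candidate whose scattered count reaches 3
def pvStepB (grid : List (List String)) (flux : PySem.Dict (Int × Int) Int)
    (st : List (List (Option Int)) × Int × PySem.Dict Int (Int × Int)) (r c : Int) :
    List (List (Option Int)) × Int × PySem.Dict Int (Int × Int) :=
  if !(pvG grid r c == " ") && (pvC st.1 r c == none) && decide (3 ≤ flux.getD (r, c) 0) then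
    (pvSet2 st.1 r c (some st.2.1), st.2.1 + 1, st.2.2.insert st.2.1 (r, c))
  else st

def scan_junctions_alt (grid : List (List String)) (cells : List (List (Option Int))) (init_junction_num : Int) : Int × (List (Int × Int × Int)) :=
  let width : Int := ((PySem.List.pyGetD grid 0 []).length : Int)
  let height : Int := (grid.length : Int)
  let flux := (PySem.List.pyRange 0 height 1).foldl (fun d r =>
      (PySem.List.pyRange 0 width 1).foldl
        (fun d c => pvScatterCell grid cells init_junction_num d r c) d)
    PySem.Dict.empty
  let res := (PySem.List.pyRange 0 height 1).foldl (fun st r =>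
      (PySem.List.pyRange 0 width 1).foldl
        (fun st c => pvStepB grid flux st r c) st)
    (cells, init_junction_num, PySem.Dict.empty)
  (res.2.1, res.2.2.items)

-- ===== PRECONDITION & SPEC =====
-- Pre_ excludes grid/cells shapes on which Python A raises IndexError (empty grid, a grid row shorter
-- than the first one, or — when the first row is nonempty — cells not covering a width×height box);
-- on a few such shapes A still returns because a space-only grid never touches cells (see cites).
def Pre_scan_junctions (grid : List (List String)) (cells : List (List (Option Int))) (init_junction_num : Int) : Prop :=
  grid ≠ [] ∧
  (∀ row ∈ grid, (PySem.List.pyGetD grid 0 []).length ≤ row.length) ∧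
  ((PySem.List.pyGetD grid 0 []).length = 0 ∨
    (grid.length ≤ cells.length ∧
      ∀ row ∈ cells.take grid.length, (PySem.List.pyGetD grid 0 []).length ≤ row.length))
instance (grid : List (List String)) (cells : List (List (Option Int))) (init_junction_num : Int) : Decidable (Pre_scan_junctions grid cells init_junction_num) := by unfold Pre_scan_junctions; infer_instance

def pvWitness_scan_junctions : List (List String) × List (List (Option Int)) × Int :=
  ([["-", "+", "-"], [" ", "|", " "]], [[none, none, none], [none, none, none]], 1)

def Spec_scan_junctions (grid : List (List String)) (cells : List (List (Option Int))) (init_junction_num : Int) (out : Int × (List (Int × Int × Int))) : Prop := out = scan_junctions_alt grid cells init_junction_num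
instance (grid : List (List String)) (cells : List (List (Option Int))) (init_junction_num : Int) (out : Int × (List (Int × Int × Int))) : Decidable (Spec_scan_junctions grid cells init_junction_num out) := by unfold Spec_scan_junctions; infer_instance

-- ===== CLAIM (what is proved, stated in full; the proofs are below) =====
def Claim_equal_scan_junctions : Prop := ∀ (grid : List (List String)) (cells : List (List (Option Int))) (init_junction_num : Int), Dom_scan_junctions grid cells init_junction_num → Pre_scan_junctions grid cells init_junction_num → Spec_scan_junctions grid cells init_junction_num (scan_junctions grid cells init_junction_num)

-- ===== LEMMAS AND PROOFS =====

-- the common yardstick both runs are measured against: "cell (r,c) becomes a junction",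
-- judged entirely against the original cells
def pvIsJunc (grid : List (List String)) (snap : List (List (Option Int))) (init h w : Int)
    (r c : Int) : Bool :=
  !(pvG grid r c == " ") && (pvC snap r c == none) &&
    decide ((3:Int) ≤ (([(r - 1, c), (r + 1, c), (r, c - 1), (r, c + 1)].filter
        (fun p : Int × Int => decide (0 ≤ p.1) && decide (p.1 < h) && decide (0 ≤ p.2) && decide (p.2 < w))).countP
        (fun p : Int × Int => pvAct init (pvG grid p.1 p.2) (pvC snap p.1 p.2)) : Int))

lemma pvC_pvSet2 (cs : List (List (Option Int))) (r c : Int) (v : Option Int) (r' c' : Int)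
    (hr : 0 ≤ r) (hc : 0 ≤ c) (hr' : 0 ≤ r') (hc' : 0 ≤ c') :
    pvC (pvSet2 cs r c v) r' c' =
      if r' = r ∧ c' = c ∧ r.toNat < cs.length ∧ c.toNat < (PySem.List.pyGetD cs r []).length
      then v else pvC cs r' c' := by
  simp only [pvC, pvSet2, PySem.List.pySetD_of_nonneg _ _ hr, PySem.List.pySetD_of_nonneg _ _ hc,
    PySem.List.pyGetD_of_nonneg _ _ hr, PySem.List.pyGetD_of_nonneg _ _ hr',
    PySem.List.pyGetD_of_nonneg _ _ hc']
  simp only [List.getD_eq_getElem?_getD, List.getElem?_set]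
  by_cases hrr : r' = r
  · subst hrr
    by_cases h1 : r'.toNat < cs.length
    · have hg : cs[r'.toNat]?.getD [] = cs[r'.toNat] := by
        simp [List.getElem?_eq_getElem h1]
      by_cases hcc : c' = c
      · subst hcc
        by_cases h2 : c'.toNat < cs[r'.toNat].length
        · simp_all
        · have : (cs[r'.toNat].set c'.toNat v)[c'.toNat]? = none := by
            rw [List.getElem?_eq_none_iff]; simp; omega
          have h3 : cs[r'.toNat][c'.toNat]? = none := by
            rw [List.getElem?_eq_none_iff]; omega
          simp_all
      · have hne : ¬ (c.toNat = c'.toNat) := by omega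
        simp_all
    · have h0 : cs[r'.toNat]? = none := by rw [List.getElem?_eq_none_iff]; omega
      have h4 : ¬ (r' < (cs.length : Int)) := by omega
      simp_all
      rw [if_neg (by omega : ¬ (r' < (cs.length : Int)))]
      simp
  · have : ¬ (r.toNat = r'.toNat) := by omega
    simp_all

set_option maxHeartbeats 1000000 in
lemma flux_eq (grid : List (List String)) (cells cs : List (List (Option Int)))
    (init h w r c : Int) (hr : 0 ≤ r) (hrh : r < h) (hc : 0 ≤ c) (hcw : c < w)
    (H1 : ∀ r' c' : Int, 0 ≤ r' → 0 ≤ c' →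
      pvAct init (pvG grid r' c') (pvC cs r' c') = pvAct init (pvG grid r' c') (pvC cells r' c')) :
    ([(-1 : Int), 1].foldl (fun f dc =>
        let adj := c + dc
        if adj < w ∧ 0 ≤ adj then
          if pvAct init (pvG grid r adj) (pvC cs r adj) then f + 1 else f
        else f)
      ([(-1 : Int), 1].foldl (fun f dr =>
        let adj := r + dr
        if adj < h ∧ 0 ≤ adj then
          if pvAct init (pvG grid adj c) (pvC cs adj c) then f + 1 else f
        else f) 0)) =
    (([(r - 1, c), (r + 1, c), (r, c - 1), (r, c + 1)].filter
        (fun p : Int × Int => decide (0 ≤ p.1) && decide (p.1 < h) && decide (0 ≤ p.2) && decide (p.2 < w))).countP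
        (fun p : Int × Int => pvAct init (pvG grid p.1 p.2) (pvC cells p.1 p.2)) : Int) := by
  simp only [List.foldl_cons, List.foldl_nil, List.filter_cons, List.filter_nil]
  have er : r + -1 = r - 1 := by ring
  have ec : c + -1 = c - 1 := by ring
  rw [er, ec]
  by_cases hu : (1:Int) ≤ r <;> by_cases hl : (1:Int) ≤ c <;>
    [rw [H1 (r - 1) c (by omega) hc, H1 r (c - 1) hr (by omega)];
     rw [H1 (r - 1) c (by omega) hc];
     rw [H1 r (c - 1) hr (by omega)];
     skip] <;>
  · rw [H1 (r + 1) c (by omega) hc, H1 r (c + 1) hr (by omega)]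
    by_cases h2 : r + 1 < h <;> by_cases h4 : c + 1 < w <;>
      simp [List.countP_cons, List.countP_nil,
        hu, hl, h2, h4, hrh, hcw, hr, hc,
        (by omega : r ≤ h), (by omega : (0:Int) ≤ r + 1),
        (by omega : c ≤ w), (by omega : (0:Int) ≤ c + 1)] <;>
      split_ifs <;> omega

lemma stepA_run (grid : List (List String)) (cells : List (List (Option Int))) (init h w : Int)
    (L : List (Int × Int)) (cs : List (List (Option Int))) (k : Nat)
    (js : PySem.Dict Int (Int × Int))
    (HL : ∀ p ∈ L, 0 ≤ p.1 ∧ p.1 < h ∧ 0 ≤ p.2 ∧ p.2 < w)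
    (Hnd : L.Nodup)
    (H1 : ∀ r c : Int, 0 ≤ r → 0 ≤ c →
      pvAct init (pvG grid r c) (pvC cs r c) = pvAct init (pvG grid r c) (pvC cells r c))
    (H2 : ∀ p ∈ L, pvC cs p.1 p.2 = pvC cells p.1 p.2)
    (H3 : ∀ e ∈ js.items, e.1 < init + k) :
    (L.foldl (fun st p => pvStepA grid init h w st p.1 p.2) (cs, init + k, js)).2.1 =
        init + k + (((L.filter (fun p => pvIsJunc grid cells init h w p.1 p.2)).length : Int)) ∧
    (L.foldl (fun st p => pvStepA grid init h w st p.1 p.2) (cs, init + k, js)).2.2.items =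
        js.items ++ ((L.filter (fun p => pvIsJunc grid cells init h w p.1 p.2)).zipIdx k).map
          (fun p => ((init + (p.2 : Int), p.1) : Int × Int × Int)) := by
  induction L generalizing cs k js with
  | nil => simp
  | cons hd tl ih =>
    obtain ⟨r, c⟩ := hd
    obtain ⟨hr, hrh, hc, hcw⟩ := HL (r, c) (by simp)
    have h2tl : pvC cs r c = pvC cells r c := H2 (r, c) (by simp)
    by_cases hskip : (pvG grid r c == " " || (pvC cs r c).isSome) = true
    · -- skipped: not a junction for B either
      have hnj : pvIsJunc grid cells init h w r c = false := by
        unfold pvIsJunc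
        rw [← h2tl]
        rcases Bool.or_eq_true _ _ |>.mp hskip with h | h
        · simp [h]
        · simp only [Option.isSome_iff_exists] at h
          obtain ⟨v, hv⟩ := h
          simp [hv]
      have hstep : pvStepA grid init h w (cs, init + k, js) r c = (cs, init + k, js) := by
        unfold pvStepA; rw [if_pos hskip]
      simp only [List.foldl_cons, hstep, List.filter_cons, hnj, Bool.false_eq_true, if_false]
      exact ih cs k js (fun p hp => HL p (by simp [hp])) Hnd.of_cons H1
        (fun p hp => H2 p (by simp [hp])) H3
    · -- not skipped
      have hg : ¬ (pvG grid r c == " ") = true := by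
        intro h; exact hskip (by simp [h])
      have hnone : pvC cells r c = none := by
        rw [← h2tl]
        cases hx : pvC cs r c with
        | none => rfl
        | some v => exact absurd (by simp [hx]) hskip
      have hflux := flux_eq grid cells cs init h w r c hr hrh hc hcw H1
      have hjunc : pvIsJunc grid cells init h w r c =
          decide (3 ≤ (([(r - 1, c), (r + 1, c), (r, c - 1), (r, c + 1)].filter
            (fun p : Int × Int => decide (0 ≤ p.1) && decide (p.1 < h) && decide (0 ≤ p.2) && decide (p.2 < w))).countP
            (fun p : Int × Int => pvAct init (pvG grid p.1 p.2) (pvC cells p.1 p.2)) : Int)) := by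
        unfold pvIsJunc
        simp [hnone, hg]
      set cnt : Int := (([(r - 1, c), (r + 1, c), (r, c - 1), (r, c + 1)].filter
            (fun p : Int × Int => decide (0 ≤ p.1) && decide (p.1 < h) && decide (0 ≤ p.2) && decide (p.2 < w))).countP
            (fun p : Int × Int => pvAct init (pvG grid p.1 p.2) (pvC cells p.1 p.2)) : Int) with hcnt
      by_cases hj : 3 ≤ cnt
      · -- junction taken
        have hstep : pvStepA grid init h w (cs, init + k, js) r c =
            (pvSet2 cs r c (some (init + k)), (init + k) + 1, js.insert (init + k) (r, c)) := by
          unfold pvStepA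
          rw [if_neg hskip]
          simp only []
          rw [hflux, if_pos hj]
        have hisj : pvIsJunc grid cells init h w r c = true := by
          rw [hjunc]; exact decide_eq_true hj
        have hfresh : (js.insert (init + k) (r, c)).items = js.items ++ [(init + k, (r, c))] := by
          apply PySem.Dict.items_insert_of_not_contains
          rw [← Bool.not_eq_true, PySem.Dict.contains_iff_mem_keys]
          intro hmem
          simp only [PySem.Dict.keys, List.mem_map] at hmem
          obtain ⟨e, he, he1⟩ := hmem
          have := H3 e he
          omega
        have hH1' : ∀ r' c' : Int, 0 ≤ r' → 0 ≤ c' →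
            pvAct init (pvG grid r' c') (pvC (pvSet2 cs r c (some (init + k))) r' c') =
            pvAct init (pvG grid r' c') (pvC cells r' c') := by
          intro r' c' hr' hc'
          rw [pvC_pvSet2 cs r c _ r' c' hr hc hr' hc']
          split_ifs with hcond
          · obtain ⟨e1, e2, _, _⟩ := hcond
            subst e1; subst e2
            rw [hnone]
            unfold pvAct
            simp
          · exact H1 r' c' hr' hc'
        have hH2' : ∀ p ∈ tl, pvC (pvSet2 cs r c (some (init + k))) p.1 p.2 = pvC cells p.1 p.2 := by
          intro p hp
          obtain ⟨hp1, _, hp2, _⟩ := HL p (by simp [hp])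
          rw [pvC_pvSet2 cs r c _ p.1 p.2 hr hc hp1 hp2]
          have hne : p ≠ (r, c) := by
            intro he; subst he
            exact (List.nodup_cons.mp Hnd).1 hp
          have : ¬ (p.1 = r ∧ p.2 = c ∧ r.toNat < cs.length ∧ c.toNat < (PySem.List.pyGetD cs r []).length) := by
            rintro ⟨a, b, -, -⟩
            exact hne (Prod.ext a b)
          rw [if_neg this]
          exact H2 p (by simp [hp])
        have hH3' : ∀ e ∈ (js.insert (init + k) (r, c)).items, e.1 < init + (k + 1 : Nat) := by
          intro e he
          rw [hfresh] at he
          rcases List.mem_append.mp he with h' | h'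
          · have := H3 e h'; push_cast; omega
          · simp at h'
            subst h'
            push_cast; omega
        have := ih (pvSet2 cs r c (some (init + k))) (k + 1) (js.insert (init + k) (r, c))
          (fun p hp => HL p (by simp [hp])) Hnd.of_cons hH1' hH2' hH3'
        rw [List.foldl_cons, hstep]
        have hcast : init + (k : Int) + 1 = init + ((k + 1 : Nat) : Int) := by push_cast; ring
        rw [hcast]
        refine ⟨?_, ?_⟩
        · rw [this.1]
          simp [hisj]
          ring
        · rw [this.2, hfresh]
          simp only [List.filter_cons, hisj, if_pos, List.zipIdx_cons, List.map_cons, List.append_assoc]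
          simp
      · -- flux too small: no junction
        have hstep : pvStepA grid init h w (cs, init + k, js) r c = (cs, init + k, js) := by
          unfold pvStepA
          rw [if_neg hskip]
          simp only []
          rw [hflux, if_neg hj]
        have hisj : pvIsJunc grid cells init h w r c = false := by
          rw [hjunc]; exact decide_eq_false hj
        rw [List.foldl_cons, hstep]
        have := ih cs k js (fun p hp => HL p (by simp [hp])) Hnd.of_cons H1
          (fun p hp => H2 p (by simp [hp])) H3
        simpa [List.filter_cons, hisj] using this

-- B's pass-2 loop computes the same canonical (count, items) form, measured against pvIsJunc,
-- provided B's per-cell test agrees with pvIsJunc on every visited coordinate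
lemma stepB_run (grid : List (List String)) (cells : List (List (Option Int))) (init h w : Int)
    (flux : PySem.Dict (Int × Int) Int)
    (L : List (Int × Int)) (cs : List (List (Option Int))) (k : Nat)
    (js : PySem.Dict Int (Int × Int))
    (HL : ∀ p ∈ L, 0 ≤ p.1 ∧ p.1 < h ∧ 0 ≤ p.2 ∧ p.2 < w)
    (Hnd : L.Nodup)
    (Hpred : ∀ p ∈ L, (!(pvG grid p.1 p.2 == " ") && (pvC cells p.1 p.2 == none)
        && decide (3 ≤ flux.getD (p.1, p.2) 0)) = pvIsJunc grid cells init h w p.1 p.2)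
    (H2 : ∀ p ∈ L, pvC cs p.1 p.2 = pvC cells p.1 p.2)
    (H3 : ∀ e ∈ js.items, e.1 < init + k) :
    (L.foldl (fun st p => pvStepB grid flux st p.1 p.2) (cs, init + k, js)).2.1 =
        init + k + (((L.filter (fun p => pvIsJunc grid cells init h w p.1 p.2)).length : Int)) ∧
    (L.foldl (fun st p => pvStepB grid flux st p.1 p.2) (cs, init + k, js)).2.2.items =
        js.items ++ ((L.filter (fun p => pvIsJunc grid cells init h w p.1 p.2)).zipIdx k).map
          (fun p => ((init + (p.2 : Int), p.1) : Int × Int × Int)) := by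
  induction L generalizing cs k js with
  | nil => simp
  | cons hd tl ih =>
    obtain ⟨r, c⟩ := hd
    obtain ⟨hr, hrh, hc, hcw⟩ := HL (r, c) (by simp)
    have h2tl : pvC cs r c = pvC cells r c := H2 (r, c) (by simp)
    have hpred : (!(pvG grid r c == " ") && (pvC cs r c == none)
        && decide (3 ≤ flux.getD (r, c) 0)) = pvIsJunc grid cells init h w r c := by
      rw [h2tl]; exact Hpred (r, c) (by simp)
    by_cases hj : pvIsJunc grid cells init h w r c = true
    · -- taken
      have hnone : pvC cells r c = none := by
        unfold pvIsJunc at hj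
        cases hx : pvC cells r c with
        | none => rfl
        | some v => rw [hx] at hj; simp at hj
      have hcond : (!(pvG grid r c == " ") && (pvC cs r c == none)
          && decide (3 ≤ flux.getD (r, c) 0)) = true := by rw [hpred]; exact hj
      have hstep : pvStepB grid flux (cs, init + k, js) r c =
          (pvSet2 cs r c (some (init + k)), (init + k) + 1, js.insert (init + k) (r, c)) := by
        unfold pvStepB
        rw [if_pos hcond]
      have hfresh : (js.insert (init + k) (r, c)).items = js.items ++ [(init + k, (r, c))] := by
        apply PySem.Dict.items_insert_of_not_contains
        rw [← Bool.not_eq_true, PySem.Dict.contains_iff_mem_keys]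
        intro hmem
        simp only [PySem.Dict.keys, List.mem_map] at hmem
        obtain ⟨e, he, he1⟩ := hmem
        have := H3 e he
        omega
      have hH2' : ∀ p ∈ tl, pvC (pvSet2 cs r c (some (init + k))) p.1 p.2 = pvC cells p.1 p.2 := by
        intro p hp
        obtain ⟨hp1, _, hp2, _⟩ := HL p (by simp [hp])
        rw [pvC_pvSet2 cs r c _ p.1 p.2 hr hc hp1 hp2]
        have hne : p ≠ (r, c) := by
          intro he; subst he
          exact (List.nodup_cons.mp Hnd).1 hp
        have : ¬ (p.1 = r ∧ p.2 = c ∧ r.toNat < cs.length ∧ c.toNat < (PySem.List.pyGetD cs r []).length) := by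
          rintro ⟨a, b, -, -⟩
          exact hne (Prod.ext a b)
        rw [if_neg this]
        exact H2 p (by simp [hp])
      have hH3' : ∀ e ∈ (js.insert (init + k) (r, c)).items, e.1 < init + (k + 1 : Nat) := by
        intro e he
        rw [hfresh] at he
        rcases List.mem_append.mp he with h' | h'
        · have := H3 e h'; push_cast; omega
        · simp at h'
          subst h'
          push_cast; omega
      have := ih (pvSet2 cs r c (some (init + k))) (k + 1) (js.insert (init + k) (r, c))
        (fun p hp => HL p (by simp [hp])) Hnd.of_cons
        (fun p hp => Hpred p (by simp [hp])) hH2' hH3'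
      rw [List.foldl_cons, hstep]
      have hcast : init + (k : Int) + 1 = init + ((k + 1 : Nat) : Int) := by push_cast; ring
      rw [hcast]
      refine ⟨?_, ?_⟩
      · rw [this.1]
        simp [hj]
        ring
      · rw [this.2, hfresh]
        simp only [List.filter_cons, hj, if_pos, List.zipIdx_cons, List.map_cons, List.append_assoc]
        simp
    · -- skipped
      have hisj : pvIsJunc grid cells init h w r c = false := Bool.eq_false_iff.mpr hj
      have hcond : (!(pvG grid r c == " ") && (pvC cs r c == none)
          && decide (3 ≤ flux.getD (r, c) 0)) = false := by rw [hpred]; exact hisj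
      have hstep : pvStepB grid flux (cs, init + k, js) r c = (cs, init + k, js) := by
        unfold pvStepB
        rw [if_neg (by rw [hcond]; simp)]
      rw [List.foldl_cons, hstep]
      have := ih cs k js (fun p hp => HL p (by simp [hp])) Hnd.of_cons
        (fun p hp => Hpred p (by simp [hp])) (fun p hp => H2 p (by simp [hp])) H3
      simpa [List.filter_cons, hisj] using this

-- a nested fold over two ranges is one fold over the product list
lemma foldl_nested {σ : Type} (F : σ → Int → Int → σ) (rows cols : List Int) (s0 : σ) :
    rows.foldl (fun st r => cols.foldl (fun st c => F st r c) st) s0 =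
      (rows.flatMap (fun r => cols.map (fun c => (r, c)))).foldl (fun st p => F st p.1 p.2) s0 := by
  induction rows generalizing s0 with
  | nil => rfl
  | cons r rows ih => simp [List.foldl_append, List.foldl_map, ih]

-- the row-major product list has no duplicate coordinates
lemma nodup_product_ranges (rows cols : List Int) (h1 : rows.Nodup) (h2 : cols.Nodup) :
    (rows.flatMap (fun r => cols.map (fun c => (r, c)))).Nodup := by
  have : rows.flatMap (fun r => cols.map (fun c => (r, c))) = rows ×ˢ cols := rfl
  rw [this]
  exact List.Nodup.product h1 h2

-- pass-1 body in closed form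
lemma scatterCell_eq (grid : List (List String)) (cells : List (List (Option Int))) (init : Int)
    (d : PySem.Dict (Int × Int) Int) (r c : Int) :
    pvScatterCell grid cells init d r c =
      if pvAct init (pvG grid r c) (pvC cells r c) then
        (pvNbrs (r, c)).foldl (fun d n => d.insert n (d.getD n 0 + 1)) d
      else d := by
  cases h : (pvG grid r c == " ") <;> cases hv : pvC cells r c <;>
    simp [pvScatterCell, pvAct, h, hv]

-- a fold whose body is itself a fold over g p is a single fold over the flatMap
lemma foldl_seg {α κ σ : Type} (f : σ → κ → σ) (g : α → List κ) (L : List α) (d : σ) :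
    L.foldl (fun d p => (g p).foldl f d) d = (L.flatMap g).foldl f d := by
  induction L generalizing d with
  | nil => rfl
  | cons hd tl ih => simp [List.foldl_append, ih]

-- conditional segments = filter then flatMap
lemma flatMap_if {α κ : Type} (a : α → Bool) (g : α → List κ) (L : List α) :
    L.flatMap (fun p => if a p then g p else []) = (L.filter a).flatMap g := by
  induction L with
  | nil => rfl
  | cons hd tl ih => by_cases h : a hd <;> simp [List.filter_cons, h, ih]

-- the four neighbors are pairwise distinct
lemma nodup_nbrs (p : Int × Int) : (pvNbrs p).Nodup := by
  simp [pvNbrs, Prod.ext_iff]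
  omega

-- neighborhood is symmetric
lemma mem_nbrs_symm (k p : Int × Int) : k ∈ pvNbrs p ↔ p ∈ pvNbrs k := by
  simp [pvNbrs, Prod.ext_iff]
  omega

-- counting an element in a flatMap of nodup segments = counting the segments containing it
lemma count_flatMap_nodup {κ : Type} [BEq κ] [LawfulBEq κ]
    (g : κ → List κ) (Q : List κ) (k : κ) (hnd : ∀ p, (g p).Nodup) :
    (Q.flatMap g).count k = Q.countP (fun p => (g p).contains k) := by
  induction Q with
  | nil => rfl
  | cons hd tl ih =>
    rw [List.flatMap_cons, List.count_append, List.countP_cons, ih]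
    by_cases h : k ∈ g hd
    · rw [List.count_eq_one_of_mem (hnd hd) h]
      simp [h]
      omega
    · rw [List.count_eq_zero.mpr h]
      simp [h]

-- double counting over two nodup lists: count in P of (a ∧ ∈ S) = count in S of (a ∧ ∈ P)
lemma countP_swap {κ : Type} [BEq κ] [LawfulBEq κ] (P S : List κ) (a : κ → Bool)
    (hP : P.Nodup) (hS : S.Nodup) :
    P.countP (fun p => a p && S.contains p) = S.countP (fun s => a s && P.contains s) := by
  rw [List.countP_eq_length_filter, List.countP_eq_length_filter]
  apply List.Perm.length_eq
  apply (List.perm_ext_iff_of_nodup (hP.filter _) (hS.filter _)).mpr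
  intro x
  simp only [List.mem_filter, Bool.and_eq_true, List.contains_iff_mem]
  tauto

-- ===== VERDICT (by name: the statement is the Claim_ definition above) =====
set_option maxHeartbeats 2000000 in
theorem scan_junctions_spec : Claim_equal_scan_junctions := by
  intro grid cells init _hdom _hpre
  unfold Spec_scan_junctions
  simp only [scan_junctions, scan_junctions_alt]
  set h : Int := (grid.length : Int) with hh
  set w : Int := ((PySem.List.pyGetD grid 0 []).length : Int) with hw
  set rows := PySem.List.pyRange 0 h 1 with hrows
  set cols := PySem.List.pyRange 0 w 1 with hcols
  rw [foldl_nested (pvScatterCell grid cells init)]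
  set P := rows.flatMap (fun r => cols.map (fun c => (r, c))) with hP
  rw [foldl_nested (fun st r c => pvStepB grid
        (P.foldl (fun d q => pvScatterCell grid cells init d q.1 q.2) PySem.Dict.empty) st r c),
      foldl_nested (pvStepA grid init h w)]
  have hmemP : ∀ p : Int × Int, p ∈ P ↔ (0 ≤ p.1 ∧ p.1 < h ∧ 0 ≤ p.2 ∧ p.2 < w) := by
    intro p
    constructor
    · intro hp
      rw [hP, List.mem_flatMap] at hp
      obtain ⟨r, hrmem, hpc⟩ := hp
      rw [List.mem_map] at hpc
      obtain ⟨c, hcmem, rfl⟩ := hpc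
      rw [hrows, PySem.List.mem_pyRange_one] at hrmem
      rw [hcols, PySem.List.mem_pyRange_one] at hcmem
      exact ⟨hrmem.1, hrmem.2, hcmem.1, hcmem.2⟩
    · rintro ⟨h1, h2, h3, h4⟩
      rw [hP, List.mem_flatMap]
      exact ⟨p.1, by rw [hrows, PySem.List.mem_pyRange_one]; exact ⟨h1, h2⟩,
        List.mem_map.mpr ⟨p.2, by rw [hcols, PySem.List.mem_pyRange_one]; exact ⟨h3, h4⟩, rfl⟩⟩
  have HL : ∀ p ∈ P, 0 ≤ p.1 ∧ p.1 < h ∧ 0 ≤ p.2 ∧ p.2 < w := fun p hp => (hmemP p).mp hp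
  have Hnd : P.Nodup :=
    nodup_product_ranges rows cols (hrows ▸ PySem.List.nodup_pyRange_one 0 h)
      (hcols ▸ PySem.List.nodup_pyRange_one 0 w)
  -- characterize the flux counter built by B's scatter pass
  set act : Int × Int → Bool := fun p => pvAct init (pvG grid p.1 p.2) (pvC cells p.1 p.2) with hact
  have hfluxD : ∀ p : Int × Int, p ∈ P →
      (P.foldl (fun d q => pvScatterCell grid cells init d q.1 q.2) PySem.Dict.empty).getD p 0 =
        (([(p.1 - 1, p.2), (p.1 + 1, p.2), (p.1, p.2 - 1), (p.1, p.2 + 1)].filter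
          (fun q : Int × Int => decide (0 ≤ q.1) && decide (q.1 < h) && decide (0 ≤ q.2) && decide (q.2 < w))).countP act : Int) := by
    intro p hpmem
    have hbody : ∀ (d : PySem.Dict (Int × Int) Int), ∀ q ∈ P,
        pvScatterCell grid cells init d q.1 q.2 =
          ((if act q then pvNbrs q else []).foldl (fun d n => d.insert n (d.getD n 0 + 1)) d) := by
      intro d q _
      rw [scatterCell_eq]
      by_cases hq : act q <;> simp [hact] at hq ⊢ <;> simp [hq]
    have hcongr : P.foldl (fun d q => pvScatterCell grid cells init d q.1 q.2) PySem.Dict.empty =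
        P.foldl (fun d q => (if act q then pvNbrs q else []).foldl
          (fun d n => d.insert n (d.getD n 0 + 1)) d) PySem.Dict.empty :=
      PySem.List.foldl_congr_mem _ _ _ _ (fun d q hq => hbody d q hq)
    rw [hcongr, foldl_seg, flatMap_if, PySem.Dict.getD_foldl_insert_add_one,
        PySem.Dict.getD_empty, zero_add]
    have hsuff : ((P.filter act).flatMap pvNbrs).count p =
        ([(p.1 - 1, p.2), (p.1 + 1, p.2), (p.1, p.2 - 1), (p.1, p.2 + 1)].filter
          (fun q : Int × Int => decide (0 ≤ q.1) && decide (q.1 < h) && decide (0 ≤ q.2) && decide (q.2 < w))).countP act := by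
      calc ((P.filter act).flatMap pvNbrs).count p
          = (P.filter act).countP (fun q => (pvNbrs q).contains p) :=
            count_flatMap_nodup pvNbrs (P.filter act) p nodup_nbrs
        _ = P.countP (fun q => (pvNbrs q).contains p && act q) := List.countP_filter ..
        _ = P.countP (fun q => act q && (pvNbrs p).contains q) := by
            apply List.countP_congr
            intro q _
            rw [List.contains_eq_mem, List.contains_eq_mem,
              decide_eq_decide.mpr (mem_nbrs_symm p q), Bool.and_comm]
        _ = (pvNbrs p).countP (fun s => act s && P.contains s) :=
            countP_swap P (pvNbrs p) act Hnd (nodup_nbrs p)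
        _ = ((pvNbrs p).filter
              (fun q : Int × Int => decide (0 ≤ q.1) && decide (q.1 < h) && decide (0 ≤ q.2) && decide (q.2 < w))).countP act := by
            rw [List.countP_filter]
            apply List.countP_congr
            intro q _
            have hmem : P.contains q = (decide (0 ≤ q.1) && decide (q.1 < h) && decide (0 ≤ q.2) && decide (q.2 < w)) := by
              rw [List.contains_eq_mem]
              by_cases hq : q ∈ P
              · obtain ⟨a1, a2, a3, a4⟩ := (hmemP q).mp hq
                simp [hq, a1, a2, a3, a4]
              · have hn := fun a1 a2 a3 a4 => hq ((hmemP q).mpr ⟨a1, a2, a3, a4⟩)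
                by_cases b1 : (0:Int) ≤ q.1 <;> by_cases b2 : q.1 < h <;>
                  by_cases b3 : (0:Int) ≤ q.2 <;> by_cases b4 : q.2 < w <;>
                  simp [hq, b1, b2, b3, b4] <;> intros <;> exact hn b1 b2 b3 b4
            rw [hmem, Bool.and_comm]
        _ = _ := by simp [pvNbrs]
    rw [hsuff]
  -- predicate agreement on every visited coordinate
  set fluxD := P.foldl (fun d q => pvScatterCell grid cells init d q.1 q.2) PySem.Dict.empty with hfluxDef
  have Hpred : ∀ p ∈ P, (!(pvG grid p.1 p.2 == " ") && (pvC cells p.1 p.2 == none)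
      && decide (3 ≤ fluxD.getD (p.1, p.2) 0))
        = pvIsJunc grid cells init h w p.1 p.2 := by
    intro p hp
    have := hfluxD p hp
    unfold pvIsJunc
    rw [show ((p.1, p.2) : Int × Int) = p from rfl, this]
  have H3 : ∀ e ∈ (PySem.Dict.empty : PySem.Dict Int (Int × Int)).items, e.1 < init + (0 : Nat) := by
    intro e he
    simp [PySem.Dict.empty] at he
  have hrunA := stepA_run grid cells init h w P cells 0 PySem.Dict.empty HL Hnd
    (fun _ _ _ _ => rfl) (fun _ _ => rfl) H3
  have hrunB := stepB_run grid cells init h w fluxD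
    P cells 0 PySem.Dict.empty HL Hnd Hpred (fun _ _ => rfl) H3
  have e0 : init + ((0 : Nat) : Int) = init := by norm_num
  rw [e0] at hrunA hrunB
  refine Prod.ext ?_ ?_
  · rw [hrunA.1, hrunB.1]
  · rw [hrunA.2, hrunB.2]
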